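-- pv_equiv track=rewrite | github.com/ealjkl/leetcode-solutions | 00918-maximum-sum-circular-subarray/main2.py | get_cmax_left
-- ===== SOURCE A (Python) =====
-- def get_csum_left(nums):
--     n = len(nums)
--     out = [nums[0]]
--     for i in range(1, n):
--         num = nums[i]
--         out.append(out[i - 1] + num)
--     return out
--
-- def get_cmax_left(nums):
--     csum = [0] + get_csum_left(nums)
--     out = [csum[0]]
--     for i in range(1, len(csum)):
--         num = csum[i]
--         el = max(out[i - 1], num)
--         out.append(el)
--     return out
-- ===== SOURCE B (Python) =====
-- def get_cmax_left(nums):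
--     s = nums[0]
--     out = [0, max(0, s)]
--     for x in nums[1:]:
--         s += x
--         out.append(max(out[-1], s))
--     return out
-- ===== Notes on version B (the rewrite author's own statement) =====
-- stated objective: simpler
-- what changed: Fuses the prefix-sum pass and the running-maximum pass into one loop maintaining two scalars (running sum and last max), dropping the csum intermediate array, the helper function and all index arithmetic.
import Mathlib
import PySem

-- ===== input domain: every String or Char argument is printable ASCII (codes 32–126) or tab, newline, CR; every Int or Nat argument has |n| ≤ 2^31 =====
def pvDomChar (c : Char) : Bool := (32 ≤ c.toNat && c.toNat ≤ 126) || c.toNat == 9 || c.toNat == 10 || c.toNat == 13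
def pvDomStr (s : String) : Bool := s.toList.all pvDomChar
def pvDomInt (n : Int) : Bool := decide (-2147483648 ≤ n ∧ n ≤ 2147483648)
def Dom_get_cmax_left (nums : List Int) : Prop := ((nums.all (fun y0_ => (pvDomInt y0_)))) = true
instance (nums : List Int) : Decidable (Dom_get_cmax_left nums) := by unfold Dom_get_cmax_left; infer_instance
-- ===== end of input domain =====

-- B fuses A's two passes (prefix sums, then running maxima) into one loop keeping a running
-- sum and the last maximum; same return value on every non-empty list (both raise on []).


-- ===== PORT A =====
-- helper get_csum_left: out = [nums[0]]; for i in range(1, n): out.append(out[i-1] + nums[i])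
-- (nums[0] on the empty list raises IndexError in Python; excluded by Pre_, pyGetD used in range)
def get_csum_left (nums : List Int) : List Int :=
  (PySem.List.pyRange 1 (nums.length : Int) 1).foldl
    (fun out i => out ++ [PySem.List.pyGetD out (i - 1) 0 + PySem.List.pyGetD nums i 0])
    [PySem.List.pyGetD nums 0 0]

def get_cmax_left (nums : List Int) : List Int :=
  let csum := 0 :: get_csum_left nums
  (PySem.List.pyRange 1 (csum.length : Int) 1).foldl
    (fun out i => out ++ [max (PySem.List.pyGetD out (i - 1) 0) (PySem.List.pyGetD csum i 0)])
    [PySem.List.pyGetD csum 0 0]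

-- ===== PORT B =====
-- s = nums[0]; out = [0, max(0, s)]; for x in nums[1:]: s += x; out.append(max(out[-1], s))
-- (the [] case raises in Python B just as in A; it is outside Pre_)
def get_cmax_left_alt (nums : List Int) : List Int :=
  match nums with
  | [] => []
  | x :: rest =>
    (rest.foldl
      (fun (acc : List Int × Int) y =>
        let s := acc.2 + y
        (acc.1 ++ [max (acc.1.getLastD 0) s], s))
      ([0, max 0 x], x)).1

-- ===== PRECONDITION & SPEC =====
-- Pre_ excludes only the empty list, on which A (nums[0]) raises IndexError.
def Pre_get_cmax_left (nums : List Int) : Prop := nums ≠ []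
instance (nums : List Int) : Decidable (Pre_get_cmax_left nums) := by unfold Pre_get_cmax_left; infer_instance
def pvWitness_get_cmax_left : List Int := [1, -2, 3]

def Spec_get_cmax_left (nums : List Int) (out : List Int) : Prop := out = get_cmax_left_alt nums
instance (nums : List Int) (out : List Int) : Decidable (Spec_get_cmax_left nums out) := by unfold Spec_get_cmax_left; infer_instance

-- ===== CLAIM (what is proved, stated in full; the proofs are below) =====
def Claim_equal_get_cmax_left : Prop := ∀ (nums : List Int), Dom_get_cmax_left nums → Pre_get_cmax_left nums → Spec_get_cmax_left nums (get_cmax_left nums)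

-- ===== LEMMAS AND PROOFS =====

-- prefix sums starting from running total s
def psum (s : Int) : List Int → List Int
  | [] => []
  | x :: xs => (s + x) :: psum (s + x) xs

-- running maxima seeded with m: [m, max m x1, max m x1 x2, …]
def rmax (m : Int) : List Int → List Int
  | [] => [m]
  | x :: xs => m :: rmax (max m x) xs

lemma psum_length (s : Int) (l : List Int) : (psum s l).length = l.length := by
  induction l generalizing s with
  | nil => rfl
  | cons x xs ih => simp [psum, ih]

lemma rmax_last (m : Int) (l : List Int) :
    (rmax m l).getD l.length 0 = l.foldl max m := by
  induction l generalizing m with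
  | nil => rfl
  | cons x xs ih => simpa [rmax] using ih (max m x)

lemma rmax_append (m : Int) (l : List Int) (a : Int) :
    rmax m (l ++ [a]) = rmax m l ++ [max (l.foldl max m) a] := by
  induction l generalizing m with
  | nil => rfl
  | cons x xs ih => simp [rmax, ih]

-- (psum s l) satisfies the recurrence A's first loop computes
lemma psum_getD_succ (s : Int) (l : List Int) (j : Nat) (hj : j + 1 < l.length) :
    (psum s l).getD (j + 1) 0 = (psum s l).getD j 0 + l.getD (j + 1) 0 := by
  induction l generalizing s j with
  | nil => simp at hj
  | cons x xs ih =>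
    cases j with
    | zero =>
      cases xs with
      | nil => simp at hj
      | cons y ys => simp [psum]
    | succ j' =>
      have hj' : j' + 1 < xs.length := by simpa using hj
      simpa [psum] using ih (s + x) j' hj'

lemma take_succ_getD {l : List Int} {k : Nat} (hk : k < l.length) :
    l.take (k + 1) = l.take k ++ [l.getD k 0] := by
  have := List.take_add_one (l := l) (i := k)
  rw [this, List.getElem?_eq_getElem hk]
  simp [List.getD, List.getElem?_eq_getElem hk]

-- A's first loop, in closed form
lemma csum_loop (nums : List Int) (hne : nums ≠ []) (k : Nat) (hk1 : 1 ≤ k)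
    (hk : k ≤ nums.length) :
    (PySem.List.pyRange 1 (k : Int) 1).foldl
      (fun out i => out ++ [PySem.List.pyGetD out (i - 1) 0 + PySem.List.pyGetD nums i 0])
      [PySem.List.pyGetD nums 0 0]
    = (psum 0 nums).take k := by
  induction k with
  | zero => omega
  | succ k ih =>
    rcases Nat.lt_or_ge 1 (k + 1) with h | h
    · have hk1' : 1 ≤ k := by omega
      have hk' : k ≤ nums.length := by omega
      have hrange : PySem.List.pyRange 1 (((k : Int)) + 1) 1
          = PySem.List.pyRange 1 (k : Int) 1 ++ [(k : Int)] :=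
        PySem.List.pyRange_one_succ_right (by exact_mod_cast hk1')
      have hlt : k < (psum 0 nums).length := by rw [psum_length]; omega
      push_cast
      rw [hrange, List.foldl_append, ih hk1' hk']
      simp only [List.foldl]
      rw [take_succ_getD hlt]
      congr 2
      have h1 : PySem.List.pyGetD ((psum 0 nums).take k) ((k : Int) - 1) 0
          = (psum 0 nums).getD (k - 1) 0 := by
        have hcast : ((k : Int) - 1) = ((k - 1 : Nat) : Int) := by omega
        rw [hcast, PySem.List.pyGetD_natCast]
        unfold List.getD
        rw [List.getElem?_take_of_lt (by omega)]
      have h2 : PySem.List.pyGetD nums (k : Int) 0 = nums.getD k 0 :=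
        PySem.List.pyGetD_natCast _ _ _
      rw [h1, h2]
      have hk2 : (k - 1) + 1 = k := by omega
      have hrec := psum_getD_succ 0 nums (k - 1) (by omega)
      rw [hk2] at hrec
      omega
    · have hk0 : k = 0 := by omega
      subst hk0
      rw [show ((0 + 1 : Nat) : Int) = 1 by norm_num,
        PySem.List.pyRange_one_eq_nil (le_refl _)]
      cases nums with
      | nil => exact absurd rfl hne
      | cons x xs => simp [psum, PySem.List.pyGetD]

-- A's second loop (running maximum over 0 :: p), in closed form
lemma cmax_loop (p : List Int) (k : Nat) (hk1 : 1 ≤ k) (hk : k ≤ p.length + 1) :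
    (PySem.List.pyRange 1 (k : Int) 1).foldl
      (fun out i => out ++ [max (PySem.List.pyGetD out (i - 1) 0) (PySem.List.pyGetD (0 :: p) i 0)])
      [PySem.List.pyGetD (0 :: p) 0 0]
    = rmax 0 (p.take (k - 1)) := by
  induction k with
  | zero => omega
  | succ k ih =>
    rcases Nat.lt_or_ge 1 (k + 1) with h | h
    · have hk1' : 1 ≤ k := by omega
      have hk' : k ≤ p.length + 1 := by omega
      have hkp : k - 1 < p.length := by omega
      have hrange : PySem.List.pyRange 1 (((k : Int)) + 1) 1
          = PySem.List.pyRange 1 (k : Int) 1 ++ [(k : Int)] :=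
        PySem.List.pyRange_one_succ_right (by exact_mod_cast hk1')
      push_cast
      rw [hrange, List.foldl_append, ih hk1' hk']
      simp only [List.foldl]
      have hlen : (p.take (k - 1)).length = k - 1 := by
        rw [List.length_take]; omega
      have h1 : PySem.List.pyGetD (rmax 0 (p.take (k - 1))) ((k : Int) - 1) 0
          = (p.take (k - 1)).foldl max 0 := by
        have hcast : ((k : Int) - 1) = ((k - 1 : Nat) : Int) := by omega
        rw [hcast, PySem.List.pyGetD_natCast]
        have h := rmax_last 0 (p.take (k - 1))
        rw [hlen] at h
        exact h
      have h2 : PySem.List.pyGetD (0 :: p) (k : Int) 0 = p.getD (k - 1) 0 := by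
        rw [PySem.List.pyGetD_natCast]
        cases hke : k with
        | zero => omega
        | succ k' => simp
      rw [h1, h2, ← rmax_append, ← take_succ_getD hkp]
      congr 2
      omega
    · have hk0 : k = 0 := by omega
      subst hk0
      rw [show ((0 + 1 : Nat) : Int) = 1 by norm_num,
        PySem.List.pyRange_one_eq_nil (le_refl _)]
      simp [rmax, PySem.List.pyGetD]

-- B's running state, as a recursion on the remaining elements (m = last max, s = running sum)
def cont (m s : Int) : List Int → List Int
  | [] => []
  | y :: ys => max m (s + y) :: cont (max m (s + y)) (s + y) ys

lemma b_fold (l : List Int) (out : List Int) (s : Int) (hne : out ≠ []) :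
    (l.foldl
      (fun (acc : List Int × Int) y =>
        let s := acc.2 + y
        (acc.1 ++ [max (acc.1.getLastD 0) s], s))
      (out, s)).1 = out ++ cont (out.getLastD 0) s l := by
  induction l generalizing out s with
  | nil => simp [cont]
  | cons y ys ih =>
    simp only [List.foldl, cont]
    rw [ih _ _ (by simp)]
    simp [List.append_assoc]

lemma rmax_psum_cont (l : List Int) (m s : Int) :
    rmax m (psum s l) = m :: cont m s l := by
  induction l generalizing m s with
  | nil => rfl
  | cons y ys ih => simp [psum, rmax, cont, ih]

-- glue: A in closed form
lemma getA (nums : List Int) (hne : nums ≠ []) :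
    get_cmax_left nums = rmax 0 (psum 0 nums) := by
  have hn1 : 1 ≤ nums.length := List.length_pos_iff.mpr hne
  have hcs : get_csum_left nums = psum 0 nums := by
    have := csum_loop nums hne nums.length hn1 (le_refl _)
    rw [List.take_of_length_le (by rw [psum_length])] at this
    exact this
  have key := cmax_loop (psum 0 nums) ((psum 0 nums).length + 1) (by omega) (by omega)
  unfold get_cmax_left
  rw [hcs]
  show (PySem.List.pyRange 1 (((0 :: psum 0 nums).length : Nat) : Int) 1).foldl
      (fun out i => out ++ [max (PySem.List.pyGetD out (i - 1) 0) (PySem.List.pyGetD (0 :: psum 0 nums) i 0)])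
      [PySem.List.pyGetD (0 :: psum 0 nums) 0 0] = rmax 0 (psum 0 nums)
  rw [show ((0 :: psum 0 nums).length) = (psum 0 nums).length + 1 from by simp]
  rw [key, Nat.add_sub_cancel, List.take_of_length_le (le_refl _)]

-- ===== VERDICT (by name: the statement is the Claim_ definition above) =====
theorem get_cmax_left_spec : Claim_equal_get_cmax_left := by
  intro nums _ hpre
  unfold Spec_get_cmax_left
  cases nums with
  | nil => exact absurd rfl hpre
  | cons x rest =>
    rw [getA _ hpre]
    have hb : get_cmax_left_alt (x :: rest)
        = [0, max 0 x] ++ cont (([0, max 0 x] : List Int).getLastD 0) x rest :=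
      b_fold rest [0, max 0 x] x (by simp)
    rw [hb]
    simp [psum, rmax, zero_add, rmax_psum_cont, List.getLastD]
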